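-- pv_equiv track=rewrite | github.com/mattsta/mpreg | mpreg/core/topic_exchange.py | generate_test_patterns
-- ===== SOURCE A (Python) =====
-- def generate_test_patterns(count: int) -> list[str]:
--     """Generate realistic subscription patterns."""
--     patterns = [
--         "user.*.login.*",
--         "order.#",
--         "payment.*.success",
--         "inventory.*.update.*",
--         "analytics.#",
--         "system.*.error",
--         "user.*.profile.update",
--         "order.*.cancelled",
--         "payment.*.failed",
--         "inventory.*.low_stock",
--     ]
--
--     # Generate more patterns by varying the base ones
--     extended_patterns = []
--     for i in range(count):
--         base_pattern = patterns[i % len(patterns)]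
--         extended_patterns.append(base_pattern)
--
--     return extended_patterns
-- ===== SOURCE B (Python) =====
-- def generate_test_patterns(count: int) -> list[str]:
--     """Generate realistic subscription patterns."""
--     patterns = [
--         "user.*.login.*",
--         "order.#",
--         "payment.*.success",
--         "inventory.*.update.*",
--         "analytics.#",
--         "system.*.error",
--         "user.*.profile.update",
--         "order.*.cancelled",
--         "payment.*.failed",
--         "inventory.*.low_stock",
--     ]
--     n = max(count, 0)
--     full, rem = divmod(n, len(patterns))
--     return patterns * full + patterns[:rem]
-- ===== Notes on version B (the rewrite author's own statement) =====
-- stated objective: simpler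
-- what changed: Replaces the per-index modular loop with bulk construction: divmod gives the number of whole cycles and the partial tail, built as patterns * full + patterns[:rem].
import Mathlib
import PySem

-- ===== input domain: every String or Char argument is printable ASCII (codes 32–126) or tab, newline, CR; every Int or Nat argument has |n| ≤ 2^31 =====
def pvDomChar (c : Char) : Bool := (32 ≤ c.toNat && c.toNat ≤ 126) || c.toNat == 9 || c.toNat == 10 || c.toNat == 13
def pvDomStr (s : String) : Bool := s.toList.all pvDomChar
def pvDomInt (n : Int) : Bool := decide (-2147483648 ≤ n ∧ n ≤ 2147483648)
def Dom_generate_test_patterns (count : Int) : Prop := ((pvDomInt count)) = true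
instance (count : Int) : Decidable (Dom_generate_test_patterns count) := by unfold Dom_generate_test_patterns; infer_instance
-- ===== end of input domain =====

-- B replaces A's per-index modular loop by bulk construction: divmod into whole cycles plus a partial tail (objective: simpler).

def pvPatterns : List String :=
  [ "user.*.login.*",
    "order.#",
    "payment.*.success",
    "inventory.*.update.*",
    "analytics.#",
    "system.*.error",
    "user.*.profile.update",
    "order.*.cancelled",
    "payment.*.failed",
    "inventory.*.low_stock" ]

-- ===== PORT A =====
-- for i in range(count): extended_patterns.append(patterns[i % len(patterns)])
-- patterns[i % 10] is always in range, so pyGetD is exact here.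
def generate_test_patterns (count : Int) : List String :=
  (PySem.List.pyRange 0 count 1).foldl
    (fun acc i => acc ++ [PySem.List.pyGetD pvPatterns (PySem.Int.mod i 10) ""]) []

-- ===== PORT B =====
-- n = max(count, 0); full, rem = divmod(n, 10); patterns * full + patterns[:rem]
def generate_test_patterns_alt (count : Int) : List String :=
  let n : Int := max count 0
  let full : Int := PySem.Int.floordiv n 10
  let rem : Int := PySem.Int.mod n 10
  (List.replicate full.toNat pvPatterns).flatten ++ PySem.List.slice pvPatterns none (some rem)

-- ===== PRECONDITION & SPEC =====
def Spec_generate_test_patterns (count : Int) (out : List String) : Prop := out = generate_test_patterns_alt count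
instance (count : Int) (out : List String) : Decidable (Spec_generate_test_patterns count out) := by unfold Spec_generate_test_patterns; infer_instance

-- ===== CLAIM (what is proved, stated in full; the proofs are below) =====
def Claim_equal_generate_test_patterns : Prop := ∀ (count : Int), Dom_generate_test_patterns count → Spec_generate_test_patterns count (generate_test_patterns count)

-- ===== LEMMAS AND PROOFS =====

-- B's value, expressed over a natural count n.
def pvBulk (n : Nat) : List String :=
  (List.replicate (n / 10) pvPatterns).flatten ++ pvPatterns.take (n % 10)

lemma pvBulk_succ (n : Nat) :
    pvBulk (n + 1) = pvBulk n ++ [pvPatterns.getD (n % 10) ""] := by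
  have hlt : n % 10 < pvPatterns.length := by
    simp only [show pvPatterns.length = 10 from rfl]; omega
  have hget : pvPatterns.getD (n % 10) "" = pvPatterns[n % 10] := by
    simp [List.getD_eq_getElem?_getD, List.getElem?_eq_getElem hlt]
  by_cases h9 : n % 10 = 9
  · have hget9 : pvPatterns.getD 9 "" = pvPatterns[9] := rfl
    have hdiv : (n + 1) / 10 = n / 10 + 1 := by omega
    have hmod : (n + 1) % 10 = 0 := by omega
    have htake : pvPatterns.take 9 ++ [pvPatterns[9]] = pvPatterns := by
      simp [pvPatterns]
    simp only [pvBulk, hdiv, hmod, h9, List.take_zero, List.append_nil,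
      List.replicate_succ', List.flatten_append, List.flatten_cons, List.flatten_nil,
      List.append_nil, List.append_assoc, hget9, htake]
  · have hdiv : (n + 1) / 10 = n / 10 := by omega
    have hmod : (n + 1) % 10 = n % 10 + 1 := by omega
    simp only [pvBulk, hdiv, hmod, hget, List.append_assoc]
    congr 1
    rw [List.take_add_one]
    simp [List.getElem?_eq_getElem hlt]

lemma pvLoop_eq_bulk (n : Nat) :
    (PySem.List.pyRange 0 (n : Int) 1).foldl
      (fun acc i => acc ++ [PySem.List.pyGetD pvPatterns (PySem.Int.mod i 10) ""]) []
      = pvBulk n := by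
  induction n with
  | zero => simp [PySem.List.pyRange_one_eq_nil, pvBulk]
  | succ n ih =>
    have hsr : PySem.List.pyRange 0 ((n : Int) + 1) 1
        = PySem.List.pyRange 0 (n : Int) 1 ++ [(n : Int)] :=
      PySem.List.pyRange_one_succ_right (by positivity)
    have hmod : PySem.Int.mod (n : Int) 10 = ((n % 10 : Nat) : Int) := by
      simp [PySem.Int.mod, Int.fmod_eq_emod]
    push_cast
    rw [hsr, List.foldl_append, ih]
    simp only [List.foldl_cons, List.foldl_nil, hmod, PySem.List.pyGetD_natCast]
    exact (pvBulk_succ n).symm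

-- ===== VERDICT (by name: the statement is the Claim_ definition above) =====
theorem generate_test_patterns_spec : Claim_equal_generate_test_patterns := by
  intro count _
  unfold Spec_generate_test_patterns generate_test_patterns generate_test_patterns_alt
  by_cases h : count ≤ 0
  · have h1 : PySem.List.pyRange 0 count 1 = [] := PySem.List.pyRange_one_eq_nil h
    have h2 : max count 0 = 0 := by omega
    rw [h1, h2]
    simp only [List.foldl_nil]
    rw [show PySem.Int.mod 0 10 = 0 from rfl,
      PySem.List.slice_to _ (le_refl (0 : Int))]
    simp [PySem.Int.floordiv]
  · have hm : max count 0 = count := by omega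
    obtain ⟨n, rfl⟩ : ∃ m : Nat, count = (m : Int) := ⟨count.toNat, by omega⟩
    rw [pvLoop_eq_bulk]
    have hfd : PySem.Int.floordiv (n : Int) 10 = ((n / 10 : Nat) : Int) := by
      simp [PySem.Int.floordiv, Int.fdiv_eq_ediv]
    have hmd : PySem.Int.mod (n : Int) 10 = ((n % 10 : Nat) : Int) := by
      simp [PySem.Int.mod, Int.fmod_eq_emod]
    simp only [hm, hfd, hmd, Int.toNat_natCast, PySem.List.slice_to_natCast, pvBulk]
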